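-- pv_equiv track=rewrite | github.com/Think-IT-think-gui/File_Base | Handler/Message.py | count_dict_occurrences
-- ===== SOURCE A (Python) =====
-- def count_dict_occurrences(dict_list):
--     occurrence_counts = {}  # Dictionary to store occurrence counts
--     new_list = []           # List to store dictionaries with occurrence counts
--
--     for d in dict_list:
--         # Convert dictionary to a hashable representation (tuples of key-value pairs)
--         dict_tuple = tuple(sorted(d.items()))
--
--         # Count occurrences of the dictionary
--         if dict_tuple in occurrence_counts:
--             occurrence_counts[dict_tuple] += 1
--         else:
--             occurrence_counts[dict_tuple] = 1
--
--     for dict_tuple, count in occurrence_counts.items():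
--         # Convert back to dictionary and add the count
--         dict_with_count = dict(dict_tuple)
--         dict_with_count['occurrences'] = count
--         new_list.append(dict_with_count)
--
--     return new_list
-- ===== SOURCE B (Python) =====
-- def count_dict_occurrences(dict_list):
--     keys = [tuple(sorted(d.items())) for d in dict_list]
--     out = []
--     for i, k in enumerate(keys):
--         if k not in keys[:i]:
--             e = dict(k)
--             e['occurrences'] = keys.count(k)
--             out.append(e)
--     return out
-- ===== Notes on version B (the rewrite author's own statement) =====
-- stated objective: alternative
-- what changed: A builds an occurrence-count dict in one pass and then iterates its items to rebuild each dict and attach the count; B makes a single filtered pass over the precomputed sorted-key list, keeping each first occurrence and counting it directly with list.count, never materialising a counter dict.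
import Mathlib
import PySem

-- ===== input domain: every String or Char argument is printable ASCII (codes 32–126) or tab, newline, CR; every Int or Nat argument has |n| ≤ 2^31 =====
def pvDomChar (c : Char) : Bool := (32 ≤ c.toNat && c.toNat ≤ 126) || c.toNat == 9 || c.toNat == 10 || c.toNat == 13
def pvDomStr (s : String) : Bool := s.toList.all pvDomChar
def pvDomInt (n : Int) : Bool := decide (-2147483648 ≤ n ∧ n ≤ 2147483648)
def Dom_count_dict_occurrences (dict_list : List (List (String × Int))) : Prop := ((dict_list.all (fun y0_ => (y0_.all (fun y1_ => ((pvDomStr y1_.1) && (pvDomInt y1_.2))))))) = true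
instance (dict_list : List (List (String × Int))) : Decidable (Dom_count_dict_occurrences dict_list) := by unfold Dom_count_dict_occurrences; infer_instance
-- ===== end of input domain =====

-- B replaces A's two passes (build a count dict, then rebuild entries from it) by one filtered pass over the
-- key list: keep each first occurrence and count it directly with list.count. Objective: alternative decomposition.

-- tuple(sorted(d.items())): the input association list denotes a Python dict (PySem.Dict.ofList), whose items
-- are sorted by Python's tuple order = lexicographic on (key, value) = PySem.List.sorted2.
def pvSortedKey (d : List (String × Int)) : List (String × Int) :=
  PySem.List.sorted2 (PySem.Dict.ofList d).items (fun p => p.1) (fun p => p.2)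

-- ===== PORT A =====
def count_dict_occurrences (dict_list : List (List (String × Int))) : List (List (String × Int)) :=
  let occurrence_counts : PySem.Dict (List (String × Int)) Int :=
    dict_list.foldl
      (fun occ d =>
        let dict_tuple := pvSortedKey d
        if occ.contains dict_tuple then occ.insert dict_tuple (occ.getD dict_tuple 0 + 1)
        else occ.insert dict_tuple 1)
      PySem.Dict.empty
  occurrence_counts.items.foldl
    (fun new_list kv =>
      ((new_list ++ [((PySem.Dict.ofList kv.1).insert "occurrences" kv.2).items])))
    []

-- ===== PORT B =====
def count_dict_occurrences_alt (dict_list : List (List (String × Int))) : List (List (String × Int)) :=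
  let keys := dict_list.map pvSortedKey
  (PySem.List.enumerate keys 0).foldl
    (fun out ik =>
      if ik.2 ∈ PySem.List.slice keys none (some ik.1) then out
      else out ++ [((PySem.Dict.ofList ik.2).insert "occurrences" ((PySem.List.count keys ik.2 : Nat) : Int)).items])
    []

-- ===== PRECONDITION & SPEC =====
def Spec_count_dict_occurrences (dict_list : List (List (String × Int))) (out : List (List (String × Int))) : Prop := out = count_dict_occurrences_alt dict_list
instance (dict_list : List (List (String × Int))) (out : List (List (String × Int))) : Decidable (Spec_count_dict_occurrences dict_list out) := by unfold Spec_count_dict_occurrences; infer_instance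

-- ===== CLAIM (what is proved, stated in full; the proofs are below) =====
def Claim_equal_count_dict_occurrences : Prop := ∀ (dict_list : List (List (String × Int))), Dom_count_dict_occurrences dict_list → Spec_count_dict_occurrences dict_list (count_dict_occurrences dict_list)

-- ===== LEMMAS AND PROOFS =====

-- A's counting step on an already-computed key
def pvStep (occ : PySem.Dict (List (String × Int)) Int) (x : List (String × Int)) : PySem.Dict (List (String × Int)) Int :=
  if occ.contains x then occ.insert x (occ.getD x 0 + 1) else occ.insert x 1

-- the output entry built for a key that occurs in `keys`
def pvEntry (keys : List (List (String × Int))) (k : List (String × Int)) : List (String × Int) :=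
  ((PySem.Dict.ofList k).insert "occurrences" ((PySem.List.count keys k : Nat) : Int)).items

-- first occurrences of ys relative to an already-seen prefix pre
def pvFirsts (pre : List (List (String × Int))) : List (List (String × Int)) → List (List (String × Int))
  | [] => []
  | k :: t => if k ∈ pre then pvFirsts (pre ++ [k]) t else k :: pvFirsts (pre ++ [k]) t

lemma pv_ofList_eq_firsts (ys pre : List (List (String × Int))) :
    PySem.Set.ofList (pre ++ ys) = PySem.Set.ofList pre ++ pvFirsts pre ys := by
  induction ys generalizing pre with
  | nil => simp [pvFirsts]
  | cons k t ih =>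
    have h1 : pre ++ k :: t = (pre ++ [k]) ++ t := by simp
    rw [h1, ih, pvFirsts]
    rw [PySem.Set.ofList_append_singleton, PySem.Set.add_eq_ite]
    by_cases hk : k ∈ pre
    · simp [hk, PySem.Set.mem_ofList]
    · simp [hk, PySem.Set.mem_ofList]

lemma pv_A_eq (dict_list : List (List (String × Int))) :
    count_dict_occurrences dict_list
      = (PySem.Set.ofList (dict_list.map pvSortedKey)).map (pvEntry (dict_list.map pvSortedKey)) := by
  unfold count_dict_occurrences
  set keys := dict_list.map pvSortedKey with hkeys
  have hfold : dict_list.foldl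
      (fun (occ : PySem.Dict (List (String × Int)) Int) d =>
        let dict_tuple := pvSortedKey d
        if occ.contains dict_tuple then occ.insert dict_tuple (occ.getD dict_tuple 0 + 1)
        else occ.insert dict_tuple 1)
      PySem.Dict.empty
      = PySem.Dict.counter keys := by
    have hstep : (fun (occ : PySem.Dict (List (String × Int)) Int) d =>
        let dict_tuple := pvSortedKey d
        if occ.contains dict_tuple then occ.insert dict_tuple (occ.getD dict_tuple 0 + 1)
        else occ.insert dict_tuple 1) = (fun occ d => pvStep occ (pvSortedKey d)) := rfl
    rw [hkeys, hstep, ← List.foldl_map (f := pvSortedKey) (g := pvStep)]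
    rw [PySem.List.foldl_congr_mem _ pvStep
      (fun (d : PySem.Dict (List (String × Int)) Int) x => d.insert x (d.getD x 0 + 1)) _ ?_]
    · exact PySem.Dict.foldl_insert_getD_add_one_eq_counter _
    · intro acc x _
      by_cases h : acc.contains x
      · simp [pvStep, h]
      · simp only [Bool.not_eq_true] at h
        simp [pvStep, h, PySem.Dict.getD_of_not_contains _ _ h]
  simp only [hfold]
  rw [PySem.List.foldl_append_singleton_eq_map
    (fun kv : (List (String × Int)) × Int => ((PySem.Dict.ofList kv.1).insert "occurrences" kv.2).items)]
  rw [PySem.Dict.items_counter, List.map_map]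
  simp [pvEntry, PySem.List.count_eq]

lemma pv_B_fold (keys : List (List (String × Int))) (ys pre acc : List (List (String × Int)))
    (h : keys = pre ++ ys) :
    (PySem.List.enumerate ys (pre.length : Int)).foldl
      (fun out ik =>
        if ik.2 ∈ PySem.List.slice keys none (some ik.1) then out
        else out ++ [((PySem.Dict.ofList ik.2).insert "occurrences" ((PySem.List.count keys ik.2 : Nat) : Int)).items])
      acc
      = acc ++ (pvFirsts pre ys).map (pvEntry keys) := by
  induction ys generalizing pre acc with
  | nil => simp [PySem.List.enumerate, pvFirsts]
  | cons k t ih =>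
    rw [PySem.List.enumerate_cons, List.foldl_cons]
    have hsl : PySem.List.slice keys none (some ((pre.length : Nat) : Int)) = pre := by
      rw [PySem.List.slice_to_natCast, h, List.take_left]
    have hlen : (pre.length : Int) + 1 = ((pre ++ [k]).length : Int) := by simp
    have h2 : keys = (pre ++ [k]) ++ t := by simp [h]
    by_cases hk : k ∈ pre
    · simp only [hsl, if_pos hk]
      rw [hlen, ih (pre ++ [k]) acc h2, pvFirsts, if_pos hk]
    · simp only [hsl, if_neg hk]
      rw [hlen, ih (pre ++ [k]) _ h2, pvFirsts, if_neg hk]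
      simp [pvEntry, List.append_assoc]

lemma pv_B_eq (dict_list : List (List (String × Int))) :
    count_dict_occurrences_alt dict_list
      = (PySem.Set.ofList (dict_list.map pvSortedKey)).map (pvEntry (dict_list.map pvSortedKey)) := by
  unfold count_dict_occurrences_alt
  have h0 : (0 : Int) = (([] : List (List (String × Int))).length : Int) := by simp
  rw [h0, pv_B_fold (dict_list.map pvSortedKey) (dict_list.map pvSortedKey) [] [] (by simp)]
  have h1 := pv_ofList_eq_firsts (dict_list.map pvSortedKey) []
  simp only [List.nil_append] at h1
  rw [h1]
  simp

-- ===== VERDICT (by name: the statement is the Claim_ definition above) =====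
theorem count_dict_occurrences_spec : Claim_equal_count_dict_occurrences := by
  intro dict_list _
  unfold Spec_count_dict_occurrences
  rw [pv_A_eq, pv_B_eq]
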